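-- pv_equiv track=rewrite | github.com/lkjcalc/nAssembler | helpers.py | pcrelative_expression_to_int
-- ===== SOURCE A (Python) =====
-- def _aropexpr_to_int(s):
--     """
--     s must be a valid aropexpr.
--     Return the integer that the expression evaluates to.
--     """
--     s = s.strip()
--     sign = 1
--     if s[0] == '-':
--         sign = -1
--     s = s[1:]
--     i = len(s)
--     if '+' in s:
--         i = s.find('+')
--     if '-' in s:
--         i = min(i, s.find('-'))
--     num = s[:i].strip()
--     rest = s[i:].strip()
--     numint = imval_to_int('#'+num)
--     if len(rest) == 0:
--         return sign*numint
--     return sign*numint + _aropexpr_to_int(rest)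
--
-- def pcrelative_expression_to_int(s, address, labeldict):
--     """
--     s must be a valid pc relative expression.
--     Return the offset that the expression evaluates to (with correction for PC==address+8).
--     """
--     for i in range(len(s)):
--         if (not isalnum(s[i])) and s[i] != '_':
--             label = s[:i]
--             rest = s[i:]
--             break
--     else:
--         label = s
--         rest = ''
--     label.strip()
--     rest.strip()
--     offset = labeldict[label] - (address + 8)
--     if len(rest) == 0:
--         return offset
--     return offset + _aropexpr_to_int(rest)
--
-- def isalnum(s):
--     """Return True if s contains at least one char and only alphanumeric chars (0...9A...Za...z), False otherwise."""
--     if len(s) == 0: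
--         return False
--     for c in s:
--         if c not in '0123456789ABCDEFGHIJKLMNOPQRSTUVWXYZabcdefghijklmnopqrstuvwxyz':
--             return False
--     return True
--
-- def imval_to_int(s):
--     """
--     Return value of the immediate value s.
--     s must be a syntactically valid immediate value, or the result is meaningless.
--     """
--     sign = 1
--     if s[1] == '-':
--         sign = -1
--         s = s[0]+s[2:]
--     elif s[1] == '+':
--         s = s[0]+s[2:]
--     if s == '#0':
--         val = 0
--     elif s.startswith('#\'') and s[-1] == '\'' and len(s) == 4:
--         val = ord(s[2])
--     elif s.startswith('#0x'):
--         val = int(s[3:], 16)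
--     elif s.startswith('#0b'):
--         val = int(s[3:], 2)
--     elif s.startswith('#0'):
--         val = int(s[2:], 8)
--     else:
--         val = int(s[1:])
--     return sign*val
-- ===== SOURCE B (Python) =====
-- LABELCHARS = '0123456789ABCDEFGHIJKLMNOPQRSTUVWXYZabcdefghijklmnopqrstuvwxyz_'
--
--
-- def _term_to_int(t):
--     """Value of one sign-free arithmetic term (t is already stripped)."""
--     if t == '0':
--         return 0
--     if len(t) == 3 and t[0] == "'" == t[2]:
--         return ord(t[1])
--     if t.startswith('0x'):
--         return int(t[2:], 16)
--     if t.startswith('0b'):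
--         return int(t[2:], 2)
--     if t.startswith('0'):
--         return int(t[1:], 8)
--     return int(t)
--
--
-- def pcrelative_expression_to_int(s, address, labeldict):
--     """
--     s must be a valid pc relative expression.
--     Return the offset that the expression evaluates to (with correction for PC==address+8).
--     """
--     n = len(s)
--     i = 0
--     while i < n and s[i] in LABELCHARS:
--         i += 1
--     total = labeldict[s[:i]] - (address + 8)
--     rest = s[i:]
--     while True:
--         rest = rest.strip()
--         if not rest:
--             return total
--         sign = -1 if rest[0] == '-' else 1
--         rest = rest[1:]
--         cut = len(rest)
--         p = rest.find('+')
--         if p != -1: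
--             cut = p
--         m = rest.find('-')
--         if m != -1:
--             cut = min(cut, m)
--         total += sign * _term_to_int(rest[:cut].strip())
--         rest = rest[cut:]
-- ===== Notes on version B (the rewrite author's own statement) =====
-- stated objective: simpler
-- what changed: B replaces A's recursive _aropexpr_to_int helper by a flat accumulating loop that peels one signed term per iteration, and evaluates each term directly with a sign-free _term_to_int instead of re-prefixing '#' and going through imval_to_int's dead sign-stripping branches.
import Mathlib
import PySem

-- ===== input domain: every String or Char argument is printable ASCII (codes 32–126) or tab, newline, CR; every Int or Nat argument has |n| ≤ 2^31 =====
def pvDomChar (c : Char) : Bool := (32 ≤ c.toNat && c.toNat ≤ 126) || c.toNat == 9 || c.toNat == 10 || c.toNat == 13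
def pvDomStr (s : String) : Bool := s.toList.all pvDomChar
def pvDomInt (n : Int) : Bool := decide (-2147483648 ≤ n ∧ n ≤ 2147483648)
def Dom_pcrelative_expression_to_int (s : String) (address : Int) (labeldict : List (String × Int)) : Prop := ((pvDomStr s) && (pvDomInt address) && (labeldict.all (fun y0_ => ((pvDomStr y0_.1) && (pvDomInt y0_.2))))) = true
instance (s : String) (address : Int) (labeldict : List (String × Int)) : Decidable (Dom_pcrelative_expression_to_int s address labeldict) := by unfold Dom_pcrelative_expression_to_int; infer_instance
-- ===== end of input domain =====

-- B replaces A's recursive `_aropexpr_to_int` by a flat accumulating loop over the tail and evaluates each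
-- sign-free term directly (no '#'-prefixing, no dead sign-stripping); objective: simpler. Equal return values on Pre_.

-- Python's alphanumeric charset used by A's `isalnum`, and the same set plus '_' (B's label charset).
def pvCharsA : List Char := "0123456789ABCDEFGHIJKLMNOPQRSTUVWXYZabcdefghijklmnopqrstuvwxyz".toList
def pvLabelChars : List Char := "0123456789ABCDEFGHIJKLMNOPQRSTUVWXYZabcdefghijklmnopqrstuvwxyz_".toList

-- ===== PORT A =====

-- helpers.isalnum(s): nonempty and every char in the charset ('c not in <str>' on a 1-char needle = list membership)
def pvIsalnumA (s : List Char) : Bool :=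
  if s.length = 0 then false
  else s.all (fun c => PySem.Chars.isIn [c] pvCharsA)

-- A's `for i in range(len(s)): if (not isalnum(s[i])) and s[i] != '_': break` — index of the first breaking char
-- (or len(s) on the for-else path, where label = s = take (length)).
def pvScanA : List Char → Nat
  | [] => 0
  | c :: cs => if (!pvIsalnumA [c]) && !(c == '_') then 0 else pvScanA cs + 1

-- imval_to_int's branch chain after the sign has been handled (u is the reassigned s).
def pvImvalBodyA (sign : Int) (u : List Char) : Option Int :=
  if u = ['#', '0'] then some (sign * 0)
  else if PySem.Chars.startswith u ['#', '\''] && (PySem.List.pyGet? u (-1) == some '\'') && u.length == 4 then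
    (PySem.List.pyGet? u 2).map (fun c => sign * (c.toNat : Int))   -- ord(s[2]); in range since len(s) == 4
  else if PySem.Chars.startswith u ['#', '0', 'x'] then (PySem.Int.ofCharsBase? (u.drop 3) 16).map (fun v => sign * v)
  else if PySem.Chars.startswith u ['#', '0', 'b'] then (PySem.Int.ofCharsBase? (u.drop 3) 2).map (fun v => sign * v)
  else if PySem.Chars.startswith u ['#', '0'] then (PySem.Int.ofCharsBase? (u.drop 2) 8).map (fun v => sign * v)
  else (PySem.Int.ofChars? (u.drop 1)).map (fun v => sign * v)

-- imval_to_int: s[1] raises IndexError on len(s) < 2 (the two none arms); s[0]+s[2:] = c0 :: t.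
def pvImvalA (s : List Char) : Option Int :=
  match s with
  | [] => none
  | [_] => none
  | c0 :: c1 :: t =>
    if c1 = '-' then pvImvalBodyA (-1) (c0 :: t)
    else if c1 = '+' then pvImvalBodyA 1 (c0 :: t)
    else pvImvalBodyA 1 (c0 :: c1 :: t)

-- _aropexpr_to_int; the Nat fuel only makes the recursion structural (callers pass fuel > length, never exhausted).
def pvAropAGo : Nat → List Char → Option Int
  | 0, _ => none
  | fuel + 1, r =>
    match PySem.Chars.strip r with
    | [] => none          -- s[0]: IndexError on empty
    | c0 :: s1 =>         -- sign from s[0]; s = s[1:] is s1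
      let sign : Int := if c0 = '-' then -1 else 1
      let i0 : Int := s1.length
      let i1 : Int := if PySem.Chars.isIn ['+'] s1 then PySem.Chars.find s1 ['+'] else i0
      let i2 : Int := if PySem.Chars.isIn ['-'] s1 then min i1 (PySem.Chars.find s1 ['-']) else i1
      -- i2 ≥ 0 here (finds are guarded by 'in'), so s[:i] / s[i:] are take/drop at i2.toNat
      let num := PySem.Chars.strip (s1.take i2.toNat)
      let rest := PySem.Chars.strip (s1.drop i2.toNat)
      match pvImvalA ('#' :: num) with   -- imval_to_int('#'+num); none = the Python raises
      | none => none
      | some numint =>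
        if rest.length = 0 then some (sign * numint)
        else (pvAropAGo fuel rest).map (fun v => sign * numint + v)

def pcrelative_expression_to_int (s : String) (address : Int) (labeldict : List (String × Int)) : Int :=
  let cs := s.toList
  let i := pvScanA cs
  let label := cs.take i
  let rest := cs.drop i
  -- 'label.strip()' / 'rest.strip()' discard their results in A: no-ops
  let res : Option Int :=
    match (PySem.Dict.mk labeldict).get? (String.ofList label) with   -- labeldict[label]; none = KeyError
    | none => none
    | some lv =>
      let offset := lv - (address + 8)
      if rest.length = 0 then some offset
      else (pvAropAGo (rest.length + 1) rest).map (fun v => offset + v)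
  res.getD 0   -- none = the Python raises; outside Pre_

-- ===== PORT B =====

-- b._term_to_int: one sign-free, stripped term
def pvTermB (t : List Char) : Option Int :=
  if t = ['0'] then some 0
  else if t.length == 3 && PySem.List.pyGet? t 0 == some '\'' && PySem.List.pyGet? t 2 == some '\'' then
    (PySem.List.pyGet? t 1).map (fun c => (c.toNat : Int))
  else if PySem.Chars.startswith t ['0', 'x'] then PySem.Int.ofCharsBase? (t.drop 2) 16
  else if PySem.Chars.startswith t ['0', 'b'] then PySem.Int.ofCharsBase? (t.drop 2) 2
  else if PySem.Chars.startswith t ['0'] then PySem.Int.ofCharsBase? (t.drop 1) 8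
  else PySem.Int.ofChars? t

-- B's label scan: `while i < n and s[i] in LABELCHARS`
def pvScanB : List Char → Nat
  | [] => 0
  | c :: cs => if pvLabelChars.contains c then pvScanB cs + 1 else 0

-- B's term-peeling loop; the Nat fuel only makes the loop structural (callers pass fuel > length, never exhausted).
def pvLoopBGo : Nat → Int → List Char → Option Int
  | 0, _, _ => none
  | fuel + 1, total, rest =>
    match PySem.Chars.strip rest with
    | [] => some total
    | c :: t =>
      let sign : Int := if c = '-' then -1 else 1
      let cut0 : Int := t.length
      let p := PySem.Chars.find t ['+']
      let cut1 : Int := if p ≠ -1 then p else cut0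
      let m := PySem.Chars.find t ['-']
      let cut2 : Int := if m ≠ -1 then min cut1 m else cut1
      -- cut2 ≥ 0 (finds guarded by ≠ -1), so rest[:cut] / rest[cut:] are take/drop at cut2.toNat
      match pvTermB (PySem.Chars.strip (t.take cut2.toNat)) with
      | none => none      -- int() ValueError in the Python; outside Pre_
      | some v => pvLoopBGo fuel (total + sign * v) (t.drop cut2.toNat)

def pcrelative_expression_to_int_alt (s : String) (address : Int) (labeldict : List (String × Int)) : Int :=
  let cs := s.toList
  let i := pvScanB cs
  let rest := cs.drop i
  (((PySem.Dict.mk labeldict).get? (String.ofList (cs.take i))).bind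
    (fun lv => pvLoopBGo (rest.length + 1) (lv - (address + 8)) rest)).getD 0

-- ===== PRECONDITION & SPEC =====

-- a '+' or '-' (the term separators)
def pvSignChar (c : Char) : Bool := c == '+' || c == '-'

-- one valid immediate term (already stripped, sign-free): the shapes imval_to_int accepts without raising
def pvValidTerm (t : List Char) : Bool :=
  !t.isEmpty &&
  (if t = ['0'] then true
   else if t.length == 3 && t[0]? == some '\'' && t[2]? == some '\'' then true
   else if PySem.Chars.startswith t ['0', 'x'] then (PySem.Int.ofCharsBase? (t.drop 2) 16).isSome
   else if PySem.Chars.startswith t ['0', 'b'] then (PySem.Int.ofCharsBase? (t.drop 2) 2).isSome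
   else if PySem.Chars.startswith t ['0'] then (PySem.Int.ofCharsBase? (t.drop 1) 8).isSome
   else (PySem.Int.ofChars? t).isSome)

-- Pre_ = exactly the inputs on which the Python A returns (it raises elsewhere: KeyError for a label not in
-- labeldict, IndexError/ValueError for a malformed arithmetic tail): the label must be a key, and the tail, if
-- present, must strip to a nonempty string whose pieces between '+'/'-' separators (first char dropped, as A
-- drops it as a sign) are each a valid immediate term after stripping.
def Pre_pcrelative_expression_to_int (s : String) (address : Int) (labeldict : List (String × Int)) : Prop :=
  let cs := s.toList
  let i := cs.findIdx (fun c => !(pvLabelChars.contains c))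
  let rest := cs.drop i
  ((PySem.Dict.mk labeldict).get? (String.ofList (cs.take i))).isSome = true ∧
    (rest = [] ∨
      (PySem.Chars.strip rest ≠ [] ∧
        ∀ piece ∈ ((PySem.Chars.strip rest).drop 1).splitOnP pvSignChar,
          pvValidTerm (PySem.Chars.strip piece) = true))

instance (s : String) (address : Int) (labeldict : List (String × Int)) : Decidable (Pre_pcrelative_expression_to_int s address labeldict) := by unfold Pre_pcrelative_expression_to_int; infer_instance

def pvWitness_pcrelative_expression_to_int : String × Int × (List (String × Int)) := ("loop+4", 8, [("loop", 20)])


def Spec_pcrelative_expression_to_int (s : String) (address : Int) (labeldict : List (String × Int)) (out : Int) : Prop := out = pcrelative_expression_to_int_alt s address labeldict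
instance (s : String) (address : Int) (labeldict : List (String × Int)) (out : Int) : Decidable (Spec_pcrelative_expression_to_int s address labeldict out) := by unfold Spec_pcrelative_expression_to_int; infer_instance

-- ===== CLAIM (what is proved, stated in full; the proofs are below) =====
def Claim_equal_pcrelative_expression_to_int : Prop := ∀ (s : String) (address : Int) (labeldict : List (String × Int)), Dom_pcrelative_expression_to_int s address labeldict → Pre_pcrelative_expression_to_int s address labeldict → Spec_pcrelative_expression_to_int s address labeldict (pcrelative_expression_to_int s address labeldict)


-- ===== LEMMAS AND PROOFS =====

-- strip never lengthens its argument
theorem pvStrip_length_le (l : List Char) : (PySem.Chars.strip l).length ≤ l.length := by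
  simp only [PySem.Chars.strip, PySem.Chars.rstrip, PySem.Chars.lstrip, List.length_reverse]
  calc (List.dropWhile PySem.Chars.isspace (List.dropWhile PySem.Chars.isspace l).reverse).length
      ≤ (List.dropWhile PySem.Chars.isspace l).reverse.length := List.length_dropWhile_le _ _
    _ = (List.dropWhile PySem.Chars.isspace l).length := by simp
    _ ≤ l.length := List.length_dropWhile_le _ _

-- strip is idempotent
theorem pvStrip_idem (l : List Char) : PySem.Chars.strip (PySem.Chars.strip l) = PySem.Chars.strip l := by
  simp only [PySem.Chars.strip, PySem.Chars.rstrip, PySem.Chars.lstrip]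
  set ws := PySem.Chars.isspace with hws
  set x := List.dropWhile ws l with hx
  set y := (List.dropWhile ws x.reverse).reverse with hy
  have hxy : y <+: x := by
    have h1 : List.dropWhile ws x.reverse <:+ x.reverse := List.dropWhile_suffix _
    have h2 := List.reverse_prefix.mpr h1
    rwa [List.reverse_reverse] at h2
  have hxidem : List.dropWhile ws x = x := List.dropWhile_idempotent _ _
  have hylstrip : List.dropWhile ws y = y := by
    rw [List.dropWhile_eq_self_iff]
    intro hl
    have hlx : 0 < x.length := lt_of_lt_of_le hl hxy.length_le
    have hyx : y[0] = x[0] := hxy.getElem hl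
    rw [hyx]
    exact (List.dropWhile_eq_self_iff.mp hxidem) _
  rw [hylstrip]
  have h2 : List.dropWhile ws y.reverse = y.reverse := by
    rw [hy, List.reverse_reverse]
    exact List.dropWhile_idempotent _ _
  rw [h2, List.reverse_reverse]

-- membership survives strip
theorem pvStrip_mem {c : Char} {l : List Char} (h : c ∈ PySem.Chars.strip l) : c ∈ l := by
  simp only [PySem.Chars.strip, PySem.Chars.rstrip, PySem.Chars.lstrip, List.mem_reverse] at h
  have h1 : c ∈ (List.dropWhile PySem.Chars.isspace l).reverse := (List.dropWhile_sublist _).mem h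
  rw [List.mem_reverse] at h1
  exact (List.dropWhile_sublist _).mem h1

-- [a] is a prefix of l.drop j iff l[j]? = some a
theorem pvSingleton_prefix_drop (a : Char) (l : List Char) (j : Nat) :
    ([a] <+: l.drop j) ↔ l[j]? = some a := by
  rw [← List.head?_drop]
  cases hd : l.drop j with
  | nil => simp
  | cons b t => simp [List.cons_prefix_cons, eq_comm]

-- single-char 'in' is list membership
theorem pvIsIn_single (c : Char) (l : List Char) : PySem.Chars.isIn [c] l = l.contains c := by
  have hiff := PySem.Chars.exists_prefix_drop_iff_isIn [c] l
  by_cases h : c ∈ l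
  · have hex : ∃ j, [c] <+: l.drop j := by
      obtain ⟨j, hj, he⟩ := List.mem_iff_getElem.mp h
      exact ⟨j, (pvSingleton_prefix_drop c l j).mpr (by simp [List.getElem?_eq_getElem hj, he])⟩
    rw [hiff.mp hex, List.contains_iff_mem.mpr h]
  · have h1 : PySem.Chars.isIn [c] l ≠ true := by
      intro ht
      obtain ⟨j, hj⟩ := hiff.mpr ht
      rw [pvSingleton_prefix_drop] at hj
      exact h (List.mem_of_getElem? hj)
    have h2 : l.contains c ≠ true := fun ht => h (List.contains_iff_mem.mp ht)
    simp only [ne_eq, Bool.not_eq_true] at h1 h2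
    rw [h1, h2]

theorem pvLabelChars_eq : pvLabelChars = pvCharsA ++ ['_'] := by decide

-- A's break test equals B's charset test
theorem pvBreak_eq (c : Char) : ((!pvIsalnumA [c]) && !(c == '_')) = !(pvLabelChars.contains c) := by
  have h1 : pvIsalnumA [c] = pvCharsA.contains c := by
    simp [pvIsalnumA, pvIsIn_single]
  have h2 : pvLabelChars.contains c = (pvCharsA.contains c || c == '_') := by
    rw [pvLabelChars_eq, List.contains_append]
    simp [← Bool.beq_eq_decide_eq]
  rw [h1, h2]
  cases hb : pvCharsA.contains c <;> cases hc : (c == '_') <;> simp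

-- both scans compute the findIdx of the non-label-char predicate used by Pre_
theorem pvScanB_eq_findIdx (cs : List Char) : pvScanB cs = cs.findIdx (fun c => !(pvLabelChars.contains c)) := by
  induction cs with
  | nil => rfl
  | cons c cs ih =>
    rw [List.findIdx_cons]
    cases h : pvLabelChars.contains c <;>
      simp only [pvScanB, h, ih, Bool.not_true, Bool.not_false, cond_true, cond_false,
        Bool.false_eq_true, if_false, if_true]

theorem pvScanA_eq_scanB (cs : List Char) : pvScanA cs = pvScanB cs := by
  induction cs with
  | nil => rfl
  | cons c cs ih =>
    rw [pvScanA, pvScanB, pvBreak_eq]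
    cases h : pvLabelChars.contains c <;> simp [ih]

-- what s.find(single char) = f ≥ 0 means: first occurrence
theorem pvFind_single_spec (a : Char) (t : List Char) (h : PySem.Chars.isIn [a] t = true) :
    0 ≤ PySem.Chars.find t [a] ∧ (PySem.Chars.find t [a]).toNat < t.length ∧
      t[(PySem.Chars.find t [a]).toNat]? = some a ∧
      ∀ j < (PySem.Chars.find t [a]).toNat, t[j]? ≠ some a := by
  have h0 : 0 ≤ PySem.Chars.find t [a] :=
    (PySem.Chars.find_nonneg_iff t [a]).mpr ((PySem.Chars.isIn_iff_infix [a] t).mp h)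
  obtain ⟨h1, h2⟩ := PySem.Chars.find_spec (s := t) (sub := [a]) h0
  rw [pvSingleton_prefix_drop] at h1
  refine ⟨h0, (List.getElem?_eq_some_iff.mp h1).1, h1, fun j hj hg => ?_⟩
  exact h2 j hj ((pvSingleton_prefix_drop a t j).mpr hg)

theorem pvNotIn_single (a : Char) (t : List Char) (h : PySem.Chars.isIn [a] t = false) : a ∉ t := by
  intro hm
  obtain ⟨j, hj, he⟩ := List.mem_iff_getElem.mp hm
  have : PySem.Chars.isIn [a] t = true :=
    (PySem.Chars.exists_prefix_drop_iff_isIn [a] t).mp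
      ⟨j, (pvSingleton_prefix_drop a t j).mpr (by simp [List.getElem?_eq_getElem hj, he])⟩
  simp [this] at h

theorem pvFindIdx_sign_eq (t : List Char) (p' : Nat) (hlt : p' < t.length)
    (hs : pvSignChar (t[p']) = true)
    (hb : ∀ j (hj : j < p'), pvSignChar (t[j]'(hj.trans hlt)) = false) :
    t.findIdx pvSignChar = p' :=
  (List.findIdx_eq hlt).mpr ⟨hs, hb⟩

-- A's min-of-finds split index is the first sign-char index
theorem pvCutA_eq (t : List Char) :
    (if PySem.Chars.isIn ['-'] t = true then
        min (if PySem.Chars.isIn ['+'] t = true then PySem.Chars.find t ['+'] else (t.length : Int))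
            (PySem.Chars.find t ['-'])
      else (if PySem.Chars.isIn ['+'] t = true then PySem.Chars.find t ['+'] else (t.length : Int)))
      = (t.findIdx pvSignChar : Int) := by
  have hg : ∀ (j : Nat) (hjl : j < t.length) (c : Char), t[j]'hjl = c → t[j]? = some c := by
    intro j hjl c he
    rw [List.getElem?_eq_getElem hjl, he]
  by_cases hP : PySem.Chars.isIn ['+'] t = true <;> by_cases hM : PySem.Chars.isIn ['-'] t = true
  · obtain ⟨hp0, hpl, hpe, hpb⟩ := pvFind_single_spec '+' t hP
    obtain ⟨hm0, hml, hme, hmb⟩ := pvFind_single_spec '-' t hM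
    rw [if_pos hM, if_pos hP]
    rcases le_total (PySem.Chars.find t ['+']) (PySem.Chars.find t ['-']) with hle | hle
    · rw [min_eq_left hle]
      have hk : t.findIdx pvSignChar = (PySem.Chars.find t ['+']).toNat := by
        apply pvFindIdx_sign_eq t _ hpl
        · simp [pvSignChar, (List.getElem?_eq_some_iff.mp hpe).2]
        · intro j hj
          have hj2 : j < (PySem.Chars.find t ['-']).toNat := lt_of_lt_of_le hj (Int.toNat_le_toNat hle)
          simp only [pvSignChar, Bool.or_eq_false_iff, beq_eq_false_iff_ne, ne_eq]
          exact ⟨fun he => hpb j hj (hg j (hj.trans hpl) '+' he),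
                 fun he => hmb j hj2 (hg j (hj2.trans hml) '-' he)⟩
      rw [hk]; omega
    · rw [min_eq_right hle]
      have hk : t.findIdx pvSignChar = (PySem.Chars.find t ['-']).toNat := by
        apply pvFindIdx_sign_eq t _ hml
        · simp [pvSignChar, (List.getElem?_eq_some_iff.mp hme).2]
        · intro j hj
          have hj2 : j < (PySem.Chars.find t ['+']).toNat := lt_of_lt_of_le hj (Int.toNat_le_toNat hle)
          simp only [pvSignChar, Bool.or_eq_false_iff, beq_eq_false_iff_ne, ne_eq]
          exact ⟨fun he => hpb j hj2 (hg j (hj2.trans hpl) '+' he),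
                 fun he => hmb j hj (hg j (hj.trans hml) '-' he)⟩
      rw [hk]; omega
  · obtain ⟨hp0, hpl, hpe, hpb⟩ := pvFind_single_spec '+' t hP
    have hMn : '-' ∉ t := pvNotIn_single '-' t (by simpa using hM)
    rw [if_neg hM, if_pos hP]
    have hk : t.findIdx pvSignChar = (PySem.Chars.find t ['+']).toNat := by
      apply pvFindIdx_sign_eq t _ hpl
      · simp [pvSignChar, (List.getElem?_eq_some_iff.mp hpe).2]
      · intro j hj
        simp only [pvSignChar, Bool.or_eq_false_iff, beq_eq_false_iff_ne, ne_eq]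
        exact ⟨fun he => hpb j hj (hg j (hj.trans hpl) '+' he),
               fun he => hMn (he ▸ List.getElem_mem _)⟩
    rw [hk]; omega
  · obtain ⟨hm0, hml, hme, hmb⟩ := pvFind_single_spec '-' t hM
    have hPn : '+' ∉ t := pvNotIn_single '+' t (by simpa using hP)
    rw [if_pos hM, if_neg hP]
    have hk : t.findIdx pvSignChar = (PySem.Chars.find t ['-']).toNat := by
      apply pvFindIdx_sign_eq t _ hml
      · simp [pvSignChar, (List.getElem?_eq_some_iff.mp hme).2]
      · intro j hj
        simp only [pvSignChar, Bool.or_eq_false_iff, beq_eq_false_iff_ne, ne_eq]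
        exact ⟨fun he => hPn (he ▸ List.getElem_mem _),
               fun he => hmb j hj (hg j (hj.trans hml) '-' he)⟩
    have hle : (PySem.Chars.find t ['-']) ≤ (t.length : Int) := PySem.Chars.find_le_length t ['-']
    rw [min_eq_right hle, hk]
    omega
  · have hPn : '+' ∉ t := pvNotIn_single '+' t (by simpa using hP)
    have hMn : '-' ∉ t := pvNotIn_single '-' t (by simpa using hM)
    rw [if_neg hM, if_neg hP]
    have hk : t.findIdx pvSignChar = t.length := by
      rw [List.findIdx_eq_length]
      intro x hx
      simp only [pvSignChar, Bool.or_eq_false_iff, beq_eq_false_iff_ne, ne_eq]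
      exact ⟨fun he => hPn (he ▸ hx), fun he => hMn (he ▸ hx)⟩
    rw [hk]

-- B's min-of-finds split index is the same
theorem pvCutB_eq (t : List Char) :
    (if PySem.Chars.find t ['-'] ≠ -1 then
        min (if PySem.Chars.find t ['+'] ≠ -1 then PySem.Chars.find t ['+'] else (t.length : Int))
            (PySem.Chars.find t ['-'])
      else (if PySem.Chars.find t ['+'] ≠ -1 then PySem.Chars.find t ['+'] else (t.length : Int)))
      = (t.findIdx pvSignChar : Int) := by
  have e : ∀ a : Char, (PySem.Chars.find t [a] ≠ -1) ↔ (PySem.Chars.isIn [a] t = true) := fun a => by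
    rw [PySem.Chars.find_ne_neg_one_iff, ← PySem.Chars.isIn_iff_infix]
  simp only [e]
  exact pvCutA_eq t

-- no sign char occurs before the split index
theorem pvNum_nosign (t : List Char) :
    ∀ c ∈ PySem.Chars.strip (t.take (t.findIdx pvSignChar)), pvSignChar c = false := by
  intro c hc
  obtain ⟨j, hm, he⟩ := List.mem_take_iff_getElem.mp (pvStrip_mem hc)
  have hj : j < t.findIdx pvSignChar := lt_of_lt_of_le hm (min_le_left _ _)
  have h2 := List.not_of_lt_findIdx hj
  exact he ▸ h2

theorem pvStartswith_single (c : Char) (u : List Char) (a : Char) :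
    PySem.Chars.startswith (c :: u) [a] = (c == a) := by
  rcases h : (c == a) with _ | _
  · rcases h2 : PySem.Chars.startswith (c :: u) [a] with _ | _
    · rfl
    · have h3 := (PySem.Chars.startswith_iff _ _).mp h2
      rw [List.cons_prefix_cons] at h3
      rw [← h3.1, beq_self_eq_true] at h
      exact h
  · have heq : c = a := beq_iff_eq.mp h
    subst heq
    exact (PySem.Chars.startswith_iff _ _).mpr (List.cons_prefix_cons.mpr ⟨rfl, List.nil_prefix⟩)

theorem pvStartswith_cons (a : Char) (u p : List Char) :
    PySem.Chars.startswith (a :: u) (a :: p) = PySem.Chars.startswith u p := by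
  rcases hs : PySem.Chars.startswith u p with _ | _
  · rcases hs2 : PySem.Chars.startswith (a :: u) (a :: p) with _ | _
    · rfl
    · have h1 := (PySem.Chars.startswith_iff _ _).mp hs2
      rw [List.cons_prefix_cons] at h1
      have h2 := (PySem.Chars.startswith_iff u p).mpr h1.2
      simp [h2] at hs
  · exact (PySem.Chars.startswith_iff _ _).mpr
      (List.cons_prefix_cons.mpr ⟨rfl, (PySem.Chars.startswith_iff u p).mp hs⟩)

-- on sign-free terms, A's imval_to_int('#'+t) is B's _term_to_int(t)
theorem pvTerm_eq (t : List Char) (h : ∀ c ∈ t, pvSignChar c = false) :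
    pvImvalA ('#' :: t) = pvTermB t := by
  match t with
  | [] => decide
  | c :: ts =>
    have hc := h c (by simp)
    simp only [pvSignChar, Bool.or_eq_false_iff, beq_eq_false_iff_ne, ne_eq] at hc
    rw [pvImvalA]
    rw [if_neg (by simpa using hc.2), if_neg (by simpa using hc.1)]
    rw [pvImvalBodyA, pvTermB]
    have hmap : ∀ o : Option Int, Option.map (fun v => (1:Int) * v) o = o := by
      intro o; cases o <;> simp
    have e0 : (('#' :: c :: ts) = ['#', '0']) ↔ (c :: ts = ['0']) := by simp
    simp only [e0]
    by_cases h0 : c :: ts = ['0']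
    · rw [if_pos h0, if_pos h0]; norm_num
    · rw [if_neg h0, if_neg h0]
      have e2 : (PySem.Chars.startswith ('#' :: c :: ts) ['#', '\''] &&
            (PySem.List.pyGet? ('#' :: c :: ts) (-1) == some '\'') && (('#' :: c :: ts).length == 4))
          = ((c :: ts).length == 3 && PySem.List.pyGet? (c :: ts) 0 == some '\'' &&
            PySem.List.pyGet? (c :: ts) 2 == some '\'') := by
        by_cases hl : ts.length = 2
        · obtain ⟨a, b, rfl⟩ := List.length_eq_two.mp hl
          rw [pvStartswith_cons, pvStartswith_single]
          cases hc1 : c == '\'' <;> cases hb1 : b == '\'' <;>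
            simp [hc1, hb1, PySem.List.pyGet?, PySem.List.pyIdx?]
        · have l1 : (('#' :: c :: ts).length == 4) = false := by simp; omega
          have l2 : ((c :: ts).length == 3) = false := by simp; omega
          rw [l1, l2]; simp
      rw [e2]
      by_cases h2 : ((c :: ts).length == 3 && PySem.List.pyGet? (c :: ts) 0 == some '\'' &&
          PySem.List.pyGet? (c :: ts) 2 == some '\'') = true
      · rw [if_pos h2, if_pos h2]
        have hgv : PySem.List.pyGet? ('#' :: c :: ts) 2 = PySem.List.pyGet? (c :: ts) 1 := by
          cases ts with
          | nil => simp [PySem.List.pyGet?, PySem.List.pyIdx?]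
          | cons a ts' =>
            simp [PySem.List.pyGet?, PySem.List.pyIdx?,
              show (2:Int) ≤ (ts'.length:Int) + 1 + 1 by omega]
        rw [hgv]
        cases PySem.List.pyGet? (c :: ts) 1 <;> simp
      · rw [if_neg h2, if_neg h2]
        simp only [pvStartswith_cons, List.drop_succ_cons, List.drop_zero]
        by_cases h3 : PySem.Chars.startswith (c :: ts) ['0', 'x'] = true
        · rw [if_pos h3, if_pos h3, hmap]
        · rw [if_neg h3, if_neg h3]
          by_cases h4 : PySem.Chars.startswith (c :: ts) ['0', 'b'] = true
          · rw [if_pos h4, if_pos h4, hmap]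
          · rw [if_neg h4, if_neg h4]
            by_cases h5 : PySem.Chars.startswith (c :: ts) ['0'] = true
            · rw [if_pos h5, if_pos h5, hmap]
            · rw [if_neg h5, if_neg h5]
              exact hmap _

-- A's recursion ignores an outer strip of its argument
theorem pvAropA_strip (f : Nat) (x : List Char) :
    pvAropAGo f (PySem.Chars.strip x) = pvAropAGo f x := by
  cases f with
  | zero => rfl
  | succ f => simp only [pvAropAGo, pvStrip_idem]

-- B's loop on an all-whitespace (or empty) tail returns the accumulator
theorem pvLoopB_empty (f : Nat) (total : Int) (r : List Char) (h : PySem.Chars.strip r = [])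
    (hf : 1 ≤ f) : pvLoopBGo f total r = some total := by
  cases f with
  | zero => omega
  | succ f => simp only [pvLoopBGo, h]

-- B's flat loop computes A's recursion, shifted by the accumulator
theorem pvLoop_arop (fuel : Nat) : ∀ (r : List Char) (total : Int), r.length < fuel →
    PySem.Chars.strip r ≠ [] →
    pvLoopBGo fuel total r = (pvAropAGo fuel r).map (fun v => total + v) := by
  induction fuel with
  | zero => intro r total h _; omega
  | succ fuel ih =>
    intro r total hlen hne
    obtain ⟨c, s1, hst⟩ : ∃ c s1, PySem.Chars.strip r = c :: s1 := by
      cases h : PySem.Chars.strip r with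
      | nil => exact absurd h hne
      | cons c s1 => exact ⟨c, s1, rfl⟩
    have hlen1 : s1.length + 1 ≤ r.length := by
      have h := pvStrip_length_le r
      rw [hst] at h
      simpa using h
    simp only [pvLoopBGo, pvAropAGo, hst]
    rw [pvCutA_eq s1, pvCutB_eq s1]
    rw [Int.toNat_natCast]
    rw [pvTerm_eq _ (pvNum_nosign s1)]
    cases ht : pvTermB (PySem.Chars.strip (s1.take (s1.findIdx pvSignChar))) with
    | none => rfl
    | some v =>
      dsimp only
      by_cases he : PySem.Chars.strip (s1.drop (s1.findIdx pvSignChar)) = []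
      · rw [pvLoopB_empty fuel _ _ he (by omega)]
        simp [he]
      · rw [if_neg (show ¬ (PySem.Chars.strip (s1.drop (s1.findIdx pvSignChar))).length = 0 by
          simpa using he)]
        rw [ih (s1.drop (s1.findIdx pvSignChar)) _
          (by have := List.length_drop (l := s1) (i := s1.findIdx pvSignChar); omega) he]
        rw [pvAropA_strip]
        cases pvAropAGo fuel (s1.drop (s1.findIdx pvSignChar)) <;> simp [add_assoc]

-- ===== VERDICT (by name: the statement is the Claim_ definition above) =====
theorem pcrelative_expression_to_int_spec : Claim_equal_pcrelative_expression_to_int := by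
  intro s address labeldict _hdom hpre
  unfold Spec_pcrelative_expression_to_int
  unfold Pre_pcrelative_expression_to_int at hpre
  obtain ⟨hget, hrest⟩ := hpre
  simp only [pcrelative_expression_to_int, pcrelative_expression_to_int_alt]
  rw [pvScanA_eq_scanB, pvScanB_eq_findIdx]
  cases hg : (PySem.Dict.mk labeldict).get?
      (String.ofList (s.toList.take (s.toList.findIdx (fun c => !(pvLabelChars.contains c))))) with
  | none => rw [hg] at hget; simp at hget
  | some lv =>
    rw [Option.bind_some]
    rcases hrest with hnil | ⟨hne, _hterms⟩
    · rw [hnil, pvLoopB_empty (([] : List Char).length + 1) (lv - (address + 8)) [] rfl (by simp)]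
      simp
    · have hlenne : ¬ (s.toList.drop (s.toList.findIdx (fun c => !(pvLabelChars.contains c)))).length = 0 := by
        intro h0
        exact hne (by rw [List.length_eq_zero_iff.mp h0]; rfl)
      dsimp only
      rw [if_neg hlenne]
      rw [pvLoop_arop _ _ _ (by omega) hne]
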